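-- pv_equiv track=rewrite | github.com/JoJoAtkinson/pentaryn | scripts/story_craft/generate_party_timeline.py | group_scenes_by_day
-- ===== SOURCE A (Python) =====
-- def group_scenes_by_day(summaries: list[dict], config: dict) -> dict:
--     """
--     Group scenes into days based on time_of_day progression and indicators.
--     Returns dict of {day_1: [scenes], day_2: [scenes], ...}
--     """
--     days = {}
--     current_day = 1
--     current_day_scenes = []
--     last_time = None
--
--     new_day_indicators = config.get("new_day_indicators", [
--         "next day",
--         "next morning",
--         "following day",
--         "long rest",
--     ])
--
--     for scene in summaries:
--         time_of_day = scene.get("time_of_day", "").lower()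
--         notes = scene.get("notes", "").lower()
--         outcome = scene.get("scene_outcome", "").lower()
--
--         # Detect day boundary
--         day_changed = False
--
--         # Check for explicit indicators
--         combined_text = f"{notes} {outcome}"
--         for indicator in new_day_indicators:
--             if indicator.lower() in combined_text:
--                 day_changed = True
--                 break
--
--         # Check for time wrapping (e.g., night → morning)
--         if last_time and not day_changed:
--             if "morning" in time_of_day and ("night" in last_time or "evening" in last_time):
--                 day_changed = True
--
--         if day_changed and current_day_scenes:
--             days[f"day_{current_day}"] = current_day_scenes
--             current_day += 1
--             current_day_scenes = []
--
--         current_day_scenes.append(scene)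
--         last_time = time_of_day
--
--     # Add final day
--     if current_day_scenes:
--         days[f"day_{current_day}"] = current_day_scenes
--
--     return days
-- ===== SOURCE B (Python) =====
-- def group_scenes_by_day(summaries: list, config: dict) -> dict:
--     """Two-phase rewrite: precompute per-scene new-day flags from consecutive
--     scene pairs, turn them into day numbers by a running count, then build
--     each day's list by filtering scenes with that day number."""
--     defaults = [
--         "next day",
--         "next morning",
--         "following day",
--         "long rest",
--     ]
--     indicators = [ind.lower() for ind in config.get("new_day_indicators", defaults)]
--
--     def starts_new_day(prev, scene):
--         text = scene.get("notes", "").lower() + " " + scene.get("scene_outcome", "").lower()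
--         if any(ind in text for ind in indicators):
--             return True
--         tod = scene.get("time_of_day", "").lower()
--         prev_tod = prev.get("time_of_day", "").lower()
--         return bool(prev_tod) and "morning" in tod and ("night" in prev_tod or "evening" in prev_tod)
--
--     if not summaries:
--         return {}
--
--     flags = [False] + [starts_new_day(p, s) for p, s in zip(summaries, summaries[1:])]
--
--     day_numbers = []
--     day = 1
--     for f in flags:
--         if f:
--             day += 1
--         day_numbers.append(day)
--
--     last = day_numbers[-1]
--     return {
--         f"day_{n}": [s for s, m in zip(summaries, day_numbers) if m == n]
--         for n in range(1, last + 1)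
--     }
-- ===== Notes on version B (the rewrite author's own statement) =====
-- stated objective: alternative
-- what changed: A's single stateful loop (running day counter, current-day buffer, last_time and in-place dict flushes) is replaced by a three-phase pipeline: pairwise new-day flags from consecutive scenes, a running count turning flags into per-scene day numbers, then each day's list rebuilt by filtering scenes with that day number.
import Mathlib
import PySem

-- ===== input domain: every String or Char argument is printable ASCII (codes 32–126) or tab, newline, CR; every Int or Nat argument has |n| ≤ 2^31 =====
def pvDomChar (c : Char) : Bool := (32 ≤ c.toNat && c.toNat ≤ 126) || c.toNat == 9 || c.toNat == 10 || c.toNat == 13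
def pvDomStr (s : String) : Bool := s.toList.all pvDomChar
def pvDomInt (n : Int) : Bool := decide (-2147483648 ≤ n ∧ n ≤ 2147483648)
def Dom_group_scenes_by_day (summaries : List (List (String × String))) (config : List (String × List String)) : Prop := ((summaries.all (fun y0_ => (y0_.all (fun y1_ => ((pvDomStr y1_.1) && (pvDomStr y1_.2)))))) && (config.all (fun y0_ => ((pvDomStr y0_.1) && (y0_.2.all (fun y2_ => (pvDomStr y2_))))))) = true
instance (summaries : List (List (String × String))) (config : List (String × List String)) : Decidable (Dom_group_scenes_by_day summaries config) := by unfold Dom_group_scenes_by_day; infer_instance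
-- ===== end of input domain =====

-- B re-groups the scenes in two phases (pairwise new-day flags, then day numbers, then per-day
-- filters) instead of A's single stateful loop; objective: alternative decomposition, same cost.

-- ===== PORT A =====

-- default for config.get("new_day_indicators", [...])
def pvDefaults : List String :=
  ["next day", "next morning", "following day", "long rest"]

-- scene.get(k, "")  (a Python dict is an assoc list here; lookup = first match)
def pvGetS (scene : List (String × String)) (k : String) : String :=
  PySem.Dict.getD (PySem.Dict.mk scene) k ""

-- the body of A's `for scene in summaries` loop, as structural recursion over the
-- same state (days, current_day, current_day_scenes, last_time); the trailing
-- `if current_day_scenes:` flush is the [] case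
def pvLoopA (inds : List String) :
    List (List (String × String)) → PySem.Dict String (List (List (String × String))) →
    Int → List (List (String × String)) → Option String →
    PySem.Dict String (List (List (String × String)))
  | [], days, d, cur, _ =>
      if !cur.isEmpty then days.insert ("day_" ++ PySem.Int.toStr d) cur else days
  | scene :: rest, days, d, cur, lt =>
      let tod := PySem.Str.lower (pvGetS scene "time_of_day")
      let notes := PySem.Str.lower (pvGetS scene "notes")
      let outcome := PySem.Str.lower (pvGetS scene "scene_outcome")
      let combined := notes ++ " " ++ outcome
      -- `for indicator in …: if …: day_changed = True; break`
      let dayChanged := inds.any (fun ind => PySem.Str.isIn (PySem.Str.lower ind) combined)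
      -- `if last_time and not day_changed: if "morning" in … : day_changed = True`
      let dayChanged :=
        match lt with
        | none => dayChanged
        | some l =>
            if !(l == "") && !dayChanged then
              if PySem.Str.isIn "morning" tod &&
                  (PySem.Str.isIn "night" l || PySem.Str.isIn "evening" l) then true
              else dayChanged
            else dayChanged
      if dayChanged && !cur.isEmpty then
        pvLoopA inds rest (days.insert ("day_" ++ PySem.Int.toStr d) cur) (d + 1) [scene] (some tod)
      else
        pvLoopA inds rest days d (cur ++ [scene]) (some tod)

def group_scenes_by_day (summaries : List (List (String × String))) (config : List (String × List String)) : List (String × List (List (String × String))) :=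
  let inds := PySem.Dict.getD (PySem.Dict.mk config) "new_day_indicators" pvDefaults
  (pvLoopA inds summaries PySem.Dict.empty 1 [] none).items

-- ===== PORT B =====

-- B's helper starts_new_day(prev, scene) (indicators pre-lowered)
def pvStartsNewDay (inds : List String) (prev scene : List (String × String)) : Bool :=
  let text := PySem.Str.lower (pvGetS scene "notes") ++ " " ++ PySem.Str.lower (pvGetS scene "scene_outcome")
  if inds.any (fun ind => PySem.Str.isIn ind text) then true
  else
    let tod := PySem.Str.lower (pvGetS scene "time_of_day")
    let ptod := PySem.Str.lower (pvGetS prev "time_of_day")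
    !(ptod == "") && PySem.Str.isIn "morning" tod &&
      (PySem.Str.isIn "night" ptod || PySem.Str.isIn "evening" ptod)

-- B's running-count loop: `day = 1; for f in flags: if f: day += 1; nums.append(day)`
def pvDayNums : List Bool → Int → List Int
  | [], _ => []
  | f :: fs, d =>
      let d' := if f then d + 1 else d
      d' :: pvDayNums fs d'

def group_scenes_by_day_alt (summaries : List (List (String × String))) (config : List (String × List String)) : List (String × List (List (String × String))) :=
  let inds := (PySem.Dict.getD (PySem.Dict.mk config) "new_day_indicators" pvDefaults).map PySem.Str.lower
  match summaries with
  | [] => []   -- `if not summaries: return {}`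
  | x0 :: rest =>
      -- flags = [False] + [starts_new_day(p, s) for p, s in zip(summaries, summaries[1:])]
      let flags := false :: (List.zip (x0 :: rest) rest).map (fun pr => pvStartsNewDay inds pr.1 pr.2)
      let nums := pvDayNums flags 1
      -- day_numbers[-1]; nums is nonempty here (flags is), so getLast?.getD is exact
      let last := nums.getLast?.getD 0
      (PySem.List.pyRange 1 (last + 1)).map (fun n =>
        ("day_" ++ PySem.Int.toStr n,
         ((List.zip (x0 :: rest) nums).filter (fun p => p.2 == n)).map Prod.fst))

-- ===== PRECONDITION & SPEC =====
def Spec_group_scenes_by_day (summaries : List (List (String × String))) (config : List (String × List String)) (out : List (String × List (List (String × String)))) : Prop := out = group_scenes_by_day_alt summaries config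
instance (summaries : List (List (String × String))) (config : List (String × List String)) (out : List (String × List (List (String × String)))) : Decidable (Spec_group_scenes_by_day summaries config out) := by unfold Spec_group_scenes_by_day; infer_instance

-- ===== CLAIM (what is proved, stated in full; the proofs are below) =====
def Claim_equal_group_scenes_by_day : Prop := ∀ (summaries : List (List (String × String))) (config : List (String × List String)), Dom_group_scenes_by_day summaries config → Spec_group_scenes_by_day summaries config (group_scenes_by_day summaries config)

-- ===== LEMMAS AND PROOFS =====

-- `str(n)` is injective for positive n (used for freshness of the "day_<n>" keys)

theorem pv_toDigitsCore_eq (fuel n : Nat) (acc : List Char) (hf : n < fuel) (hn : 0 < n) :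
    Nat.toDigitsCore 10 fuel n acc = ((Nat.digits 10 n).map Nat.digitChar).reverse ++ acc := by
  induction fuel generalizing n acc with
  | zero => omega
  | succ f ih =>
      rw [Nat.toDigitsCore]
      by_cases h : n / 10 = 0
      · have hlt : n < 10 := by omega
        rw [if_pos h, Nat.digits_def' (by norm_num) hn, h]
        simp
      · rw [if_neg h]
        have h10 : 10 ≤ n := by
          by_contra hc; exact h (Nat.div_eq_of_lt (by omega))
        rw [ih (n / 10) _ (by omega) (Nat.pos_of_ne_zero h)]
        rw [Nat.digits_def' (b := 10) (by norm_num) hn]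
        simp

theorem pv_digitChar_inj : ∀ a < 10, ∀ b < 10, Nat.digitChar a = Nat.digitChar b → a = b := by
  decide

theorem pv_map_digitChar_inj (l₁ l₂ : List Nat) (h₁ : ∀ x ∈ l₁, x < 10) (h₂ : ∀ x ∈ l₂, x < 10)
    (h : l₁.map Nat.digitChar = l₂.map Nat.digitChar) : l₁ = l₂ := by
  induction l₁ generalizing l₂ with
  | nil => cases l₂ <;> simp_all
  | cons a t ih =>
      cases l₂ with
      | nil => simp_all
      | cons b t₂ =>
          simp only [List.map_cons, List.cons.injEq] at h
          have := pv_digitChar_inj a (h₁ a (by simp)) b (h₂ b (by simp)) h.1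
          subst this
          exact congrArg _ (ih t₂ (fun x hx => h₁ x (List.mem_cons_of_mem _ hx)) (fun x hx => h₂ x (List.mem_cons_of_mem _ hx)) h.2)

theorem pv_toDigits_inj (m n : Nat) (hm : 0 < m) (hn : 0 < n)
    (h : Nat.toDigits 10 m = Nat.toDigits 10 n) : m = n := by
  rw [Nat.toDigits, Nat.toDigits,
      pv_toDigitsCore_eq _ _ _ (Nat.lt_succ_self m) hm,
      pv_toDigitsCore_eq _ _ _ (Nat.lt_succ_self n) hn] at h
  simp only [List.append_nil] at h
  have h' := List.reverse_injective h
  have := pv_map_digitChar_inj _ _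
    (fun x hx => Nat.digits_lt_base (by norm_num) hx)
    (fun x hx => Nat.digits_lt_base (by norm_num) hx) h'
  calc m = Nat.ofDigits 10 (Nat.digits 10 m) := (Nat.ofDigits_digits 10 m).symm
    _ = Nat.ofDigits 10 (Nat.digits 10 n) := by rw [this]
    _ = n := Nat.ofDigits_digits 10 n

theorem pv_key_inj (a b : Int) (ha : 1 ≤ a) (hb : 1 ≤ b) (hne : a ≠ b) :
    ("day_" ++ PySem.Int.toStr a) ≠ ("day_" ++ PySem.Int.toStr b) := by
  intro h
  apply hne
  have h₂ : PySem.Int.toStr a = PySem.Int.toStr b := by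
    have := congrArg String.toList h
    simp only [String.toList_append] at this
    exact String.toList_injective (by simpa using List.append_cancel_left this)
  have h₃ : PySem.Int.toChars a = PySem.Int.toChars b := by
    rw [PySem.Int.toStr, PySem.Int.toStr] at h₂
    have := congrArg String.toList h₂
    simpa [String.toList_ofList] using this
  rw [PySem.Int.toChars, PySem.Int.toChars, if_neg (by omega), if_neg (by omega)] at h₃
  have := pv_toDigits_inj a.toNat b.toNat (by omega) (by omega) h₃
  omega

-- the common shape: chunk the scene list at boundaries, starting from a current group
def pvChunk (inds : List String) (cur : List (List (String × String))) (prev : List (String × String)) :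
    List (List (String × String)) → List (List (List (String × String)))
  | [] => [cur]
  | x :: xs =>
      if pvStartsNewDay inds prev x then cur :: pvChunk inds [x] x xs
      else pvChunk inds (cur ++ [x]) x xs

-- labelled days from number d on
def pvLabel (d : Int) : List (List (List (String × String))) → List (String × List (List (String × String)))
  | [] => []
  | g :: gs => ("day_" ++ PySem.Int.toStr d, g) :: pvLabel (d + 1) gs

-- pairwise flags from a previous scene
def pvPF (inds : List String) (prev : List (String × String)) :
    List (List (String × String)) → List Bool
  | [] => []
  | x :: xs => pvStartsNewDay inds prev x :: pvPF inds x xs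

-- scenes tagged with their day number, groups numbered from d
def pvTag (d : Int) : List (List (List (String × String))) → List ((List (String × String)) × Int)
  | [] => []
  | g :: gs => g.map (fun s => (s, d)) ++ pvTag (d + 1) gs

-- A's two-stage day_changed computation is B's starts_new_day
theorem pv_bool_shape (a e m1 m2 : Bool) :
    (if !e && !a then (if m1 && m2 then true else a) else a)
      = (if a then true else !e && m1 && m2) := by
  cases a <;> cases e <;> cases m1 <;> cases m2 <;> rfl

theorem pv_dayChanged_eq (inds : List String) (prev x : List (String × String)) :
    (if !(PySem.Str.lower (pvGetS prev "time_of_day") == "") &&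
        !(inds.any fun ind => PySem.Str.isIn (PySem.Str.lower ind)
            (PySem.Str.lower (pvGetS x "notes") ++ " " ++ PySem.Str.lower (pvGetS x "scene_outcome"))) then
       if PySem.Str.isIn "morning" (PySem.Str.lower (pvGetS x "time_of_day")) &&
           (PySem.Str.isIn "night" (PySem.Str.lower (pvGetS prev "time_of_day")) ||
            PySem.Str.isIn "evening" (PySem.Str.lower (pvGetS prev "time_of_day"))) then true
       else (inds.any fun ind => PySem.Str.isIn (PySem.Str.lower ind)
            (PySem.Str.lower (pvGetS x "notes") ++ " " ++ PySem.Str.lower (pvGetS x "scene_outcome")))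
     else (inds.any fun ind => PySem.Str.isIn (PySem.Str.lower ind)
            (PySem.Str.lower (pvGetS x "notes") ++ " " ++ PySem.Str.lower (pvGetS x "scene_outcome"))))
      = pvStartsNewDay (inds.map PySem.Str.lower) prev x := by
  simp only [pvStartsNewDay, List.any_map, Function.comp_def]
  generalize (inds.any fun ind => PySem.Str.isIn (PySem.Str.lower ind)
      (PySem.Str.lower (pvGetS x "notes") ++ " " ++ PySem.Str.lower (pvGetS x "scene_outcome"))) = a
  generalize (PySem.Str.lower (pvGetS prev "time_of_day") == "") = e
  generalize PySem.Str.isIn "morning" (PySem.Str.lower (pvGetS x "time_of_day")) = m1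
  generalize (PySem.Str.isIn "night" (PySem.Str.lower (pvGetS prev "time_of_day")) ||
      PySem.Str.isIn "evening" (PySem.Str.lower (pvGetS prev "time_of_day"))) = m2
  exact pv_bool_shape a e m1 m2

-- A's loop produces the labelled chunks
theorem pv_loopA_eq (inds : List String) (xs : List (List (String × String)))
    (days : PySem.Dict String (List (List (String × String)))) (d : Int)
    (cur : List (List (String × String))) (prev : List (String × String))
    (hcur : cur ≠ []) (hd : 1 ≤ d)
    (hfresh : ∀ j, d ≤ j → days.contains ("day_" ++ PySem.Int.toStr j) = false) :
    (pvLoopA inds xs days d cur (some (PySem.Str.lower (pvGetS prev "time_of_day")))).items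
      = days.items ++ pvLabel d (pvChunk (inds.map PySem.Str.lower) cur prev xs) := by
  induction xs generalizing days d cur prev with
  | nil =>
      have hne : cur.isEmpty = false := by
        cases cur with
        | nil => exact absurd rfl hcur
        | cons a t => rfl
      rw [pvLoopA, hne]
      simp only [Bool.not_false, if_true]
      rw [PySem.Dict.items_insert_of_not_contains _ _ (hfresh d le_rfl)]
      rfl
  | cons x xs ih =>
      have hne : cur.isEmpty = false := by
        cases cur with
        | nil => exact absurd rfl hcur
        | cons a t => rfl
      rw [pvLoopA]
      simp only [hne, Bool.not_false, Bool.and_true]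
      rw [pv_dayChanged_eq inds prev x]
      by_cases hb : pvStartsNewDay (inds.map PySem.Str.lower) prev x = true
      · rw [if_pos hb]
        have hfresh' : ∀ j, d + 1 ≤ j →
            (days.insert ("day_" ++ PySem.Int.toStr d) cur).contains ("day_" ++ PySem.Int.toStr j) = false := by
          intro j hj
          rw [PySem.Dict.contains_insert]
          have h1 : (("day_" ++ PySem.Int.toStr j) == ("day_" ++ PySem.Int.toStr d)) = false := by
            rw [beq_eq_false_iff_ne]
            exact pv_key_inj j d (by omega) hd (by omega)
          rw [h1, hfresh j (by omega), Bool.or_false]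
        rw [ih _ _ _ x (by simp) (by omega) hfresh']
        rw [PySem.Dict.items_insert_of_not_contains _ _ (hfresh d le_rfl)]
        rw [pvChunk, if_pos hb, pvLabel]
        simp [List.append_assoc]
      · rw [if_neg hb]
        rw [ih _ _ _ x (by simp) hd hfresh]
        rw [pvChunk, if_neg hb]

-- B's flags list is pvPF
theorem pv_flags_eq (inds : List String) (x0 : List (String × String))
    (rest : List (List (String × String))) :
    (List.zip (x0 :: rest) rest).map (fun pr => pvStartsNewDay inds pr.1 pr.2) = pvPF inds x0 rest := by
  induction rest generalizing x0 with
  | nil => rfl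
  | cons y ys ih => simp [pvPF, List.zip_cons_cons, ← ih y]

-- B's (scene, day number) pairs are the tagged chunks
theorem pv_zip_nums_eq (inds : List String) (xs : List (List (String × String)))
    (prev : List (String × String)) (cur : List (List (String × String))) (d : Int) :
    cur.map (fun s => (s, d)) ++ List.zip xs (pvDayNums (pvPF inds prev xs) d)
      = pvTag d (pvChunk inds cur prev xs) := by
  induction xs generalizing prev cur d with
  | nil => simp [pvPF, pvDayNums, pvChunk, pvTag]
  | cons x xs ih =>
      simp only [pvPF, pvDayNums, pvChunk]
      by_cases h : pvStartsNewDay inds prev x = true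
      · simp only [h, if_true]
        rw [List.zip_cons_cons]
        have hih := ih (prev := x) (cur := [x]) (d := d + 1)
        simp only [List.map_cons, List.map_nil, List.singleton_append] at hih
        simp [pvTag, ← hih]
      · rw [Bool.not_eq_true] at h
        simp only [h, Bool.false_eq_true, if_false]
        rw [List.zip_cons_cons]
        have hih := ih (prev := x) (cur := cur ++ [x]) (d := d)
        simp only [List.map_append, List.map_cons, List.map_nil] at hih
        simp [← hih]

theorem pv_getLast_cons (l : List Int) : ∀ (a d : Int),
    (a :: l).getLast?.getD d = l.getLast?.getD a := by
  induction l with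
  | nil => intro a d; rfl
  | cons b t ih => intro a d; rw [List.getLast?_cons_cons, ih b d, ih b a]

-- last day number = d + number of groups - 1
theorem pv_last_eq (inds : List String) (xs : List (List (String × String)))
    (prev : List (String × String)) (cur : List (List (String × String))) (d : Int) :
    (pvDayNums (pvPF inds prev xs) d).getLast?.getD d
      = d + (pvChunk inds cur prev xs).length - 1 := by
  induction xs generalizing prev cur d with
  | nil => simp [pvPF, pvDayNums, pvChunk]
  | cons x xs ih =>
      simp only [pvPF, pvDayNums, pvChunk]
      by_cases h : pvStartsNewDay inds prev x = true
      · simp only [h, if_true]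
        rw [pv_getLast_cons, ih (cur := [x])]
        simp only [List.length_cons]
        push_cast
        ring
      · rw [Bool.not_eq_true] at h
        simp only [h, Bool.false_eq_true, if_false]
        rw [pv_getLast_cons, ih (cur := cur ++ [x])]

-- tags below n contribute nothing
theorem pv_tag_filter_lt (gs : List (List (List (String × String)))) (d n : Int) (h : n < d) :
    (pvTag d gs).filter (fun p => p.2 == n) = [] := by
  induction gs generalizing d with
  | nil => rfl
  | cons g t ih =>
      rw [pvTag, List.filter_append, ih (d + 1) (by omega), List.append_nil]
      apply List.filter_eq_nil_iff.mpr
      intro p hp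
      rcases List.mem_map.mp hp with ⟨s, _, rfl⟩
      show ¬(d == n) = true
      simp only [beq_iff_eq]
      omega

-- the per-day filters over the tagged scenes rebuild the labelled chunks
theorem pv_range_filter_eq (gs : List (List (List (String × String)))) (d : Int) :
    (PySem.List.pyRange d (d + gs.length)).map (fun n =>
        ("day_" ++ PySem.Int.toStr n, ((pvTag d gs).filter (fun p => p.2 == n)).map Prod.fst))
      = pvLabel d gs := by
  induction gs generalizing d with
  | nil =>
      have h0 : PySem.List.pyRange d (d + ((List.length (α := List (List (String × String))) []) : Int)) = [] := by
        apply List.eq_nil_iff_forall_not_mem.mpr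
        intro x hx
        have := PySem.List.mem_pyRange_one.mp hx
        simp at this
        omega
      rw [h0]
      rfl
  | cons g t ih =>
      have hb : (d : Int) < d + ((g :: t).length : Int) := by
        simp only [List.length_cons]; push_cast; omega
      rw [PySem.List.pyRange_one_cons hb, List.map_cons]
      have hsnd : ((pvTag d (g :: t)).filter (fun p => p.2 == d)).map Prod.fst = g := by
        rw [pvTag, List.filter_append, pv_tag_filter_lt t (d + 1) d (by omega), List.append_nil,
          List.filter_map, List.map_map]
        have hf : ((fun p : (List (String × String)) × Int => p.2 == d) ∘ fun s => (s, d))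
            = fun _ => true := by
          funext s; simp
        rw [hf, List.filter_true]
        have hid : (Prod.fst ∘ fun s : List (String × String) => (s, d)) = id := by
          funext s; rfl
        rw [hid, List.map_id]
      have htail : (PySem.List.pyRange (d + 1) (d + ((g :: t).length : Int))).map (fun n =>
          ("day_" ++ PySem.Int.toStr n, ((pvTag d (g :: t)).filter (fun p => p.2 == n)).map Prod.fst))
            = pvLabel (d + 1) t := by
        have hbnd : d + ((g :: t).length : Int) = (d + 1) + (t.length : Int) := by
          simp only [List.length_cons]; push_cast; ring
        rw [hbnd, ← ih (d + 1)]
        apply List.map_congr_left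
        intro n hn
        have hn' := PySem.List.mem_pyRange_one.mp hn
        have hg : (g.map (fun s => (s, d))).filter (fun p => p.2 == n) = [] := by
          apply List.filter_eq_nil_iff.mpr
          intro p hp
          rcases List.mem_map.mp hp with ⟨s, _, rfl⟩
          show ¬(d == n) = true
          simp only [beq_iff_eq]
          omega
        rw [pvTag, List.filter_append, hg, List.nil_append]
      rw [hsnd, htail, pvLabel]

-- ===== VERDICT (by name: the statement is the Claim_ definition above) =====
theorem group_scenes_by_day_spec : Claim_equal_group_scenes_by_day := by
  unfold Claim_equal_group_scenes_by_day
  intro summaries config _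
  unfold Spec_group_scenes_by_day
  cases summaries with
  | nil =>
      rfl
  | cons x0 rest =>
      simp only [group_scenes_by_day, group_scenes_by_day_alt]
      -- A's first iteration: empty current day, so no flush; state becomes ([x0], tod(x0))
      have hA : pvLoopA (PySem.Dict.getD (PySem.Dict.mk config) "new_day_indicators" pvDefaults)
            (x0 :: rest) PySem.Dict.empty 1 [] none
          = pvLoopA (PySem.Dict.getD (PySem.Dict.mk config) "new_day_indicators" pvDefaults)
            rest PySem.Dict.empty 1 [x0] (some (PySem.Str.lower (pvGetS x0 "time_of_day"))) := by
        rw [pvLoopA]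
        simp
      rw [hA, pv_loopA_eq _ rest PySem.Dict.empty 1 [x0] x0 (by simp) le_rfl
        (fun j _ => PySem.Dict.contains_empty _)]
      have hemp : (PySem.Dict.empty : PySem.Dict String (List (List (String × String)))).items = [] := rfl
      rw [hemp, List.nil_append]
      -- B's side
      rw [pv_flags_eq]
      have hnums : pvDayNums (false :: pvPF ((PySem.Dict.getD (PySem.Dict.mk config) "new_day_indicators" pvDefaults).map PySem.Str.lower) x0 rest) 1
          = 1 :: pvDayNums (pvPF ((PySem.Dict.getD (PySem.Dict.mk config) "new_day_indicators" pvDefaults).map PySem.Str.lower) x0 rest) 1 := by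
        rw [pvDayNums]
        norm_num
      rw [hnums, List.zip_cons_cons, pv_getLast_cons]
      have hzip := pv_zip_nums_eq ((PySem.Dict.getD (PySem.Dict.mk config) "new_day_indicators" pvDefaults).map PySem.Str.lower) rest x0 [x0] 1
      simp only [List.map_cons, List.map_nil, List.singleton_append] at hzip
      rw [hzip]
      rw [pv_last_eq _ rest x0 [x0] 1]
      have harith : (1 : Int) + ↑(pvChunk ((PySem.Dict.getD (PySem.Dict.mk config) "new_day_indicators" pvDefaults).map PySem.Str.lower) [x0] x0 rest).length - 1 + 1
          = 1 + ↑(pvChunk ((PySem.Dict.getD (PySem.Dict.mk config) "new_day_indicators" pvDefaults).map PySem.Str.lower) [x0] x0 rest).length := by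
        omega
      rw [harith, pv_range_filter_eq]
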